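-- pv_equiv track=rewrite | github.com/CELIANVF/video | video_app/display_core.py | ordered_stream_ids_from_list
-- ===== SOURCE A (Python) =====
-- def ordered_stream_ids_from_list(
--     raw_ids: list[str], stream_order: list[str] | None
-- ) -> list[str]:
--     raw = list(raw_ids)
--     if not stream_order:
--         return raw
--     seen: set[str] = set()
--     out: list[str] = []
--     for sid in stream_order:
--         if sid in raw and sid not in seen:
--             out.append(sid)
--             seen.add(sid)
--     for sid in raw:
--         if sid not in seen:
--             out.append(sid)
--             seen.add(sid)
--     return out
-- ===== SOURCE B (Python) =====
-- def ordered_stream_ids_from_list(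
--     raw_ids: list[str], stream_order: list[str] | None
-- ) -> list[str]:
--     if not stream_order:
--         return list(raw_ids)
--     unique = list(dict.fromkeys(raw_ids))
--     n = len(stream_order)
--
--     def rank(sid: str) -> int:
--         if sid in stream_order:
--             return stream_order.index(sid)
--         return n + unique.index(sid)
--
--     return sorted(unique, key=rank)
-- ===== Notes on version B (the rewrite author's own statement) =====
-- stated objective: alternative
-- what changed: Replaces A's two accumulating loops over a growing seen-set by a single stable sort of the deduplicated raw list under a numeric rank (stream ids rank by their first stream index, the rest by a past-the-end rank in raw order).
import Mathlib
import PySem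

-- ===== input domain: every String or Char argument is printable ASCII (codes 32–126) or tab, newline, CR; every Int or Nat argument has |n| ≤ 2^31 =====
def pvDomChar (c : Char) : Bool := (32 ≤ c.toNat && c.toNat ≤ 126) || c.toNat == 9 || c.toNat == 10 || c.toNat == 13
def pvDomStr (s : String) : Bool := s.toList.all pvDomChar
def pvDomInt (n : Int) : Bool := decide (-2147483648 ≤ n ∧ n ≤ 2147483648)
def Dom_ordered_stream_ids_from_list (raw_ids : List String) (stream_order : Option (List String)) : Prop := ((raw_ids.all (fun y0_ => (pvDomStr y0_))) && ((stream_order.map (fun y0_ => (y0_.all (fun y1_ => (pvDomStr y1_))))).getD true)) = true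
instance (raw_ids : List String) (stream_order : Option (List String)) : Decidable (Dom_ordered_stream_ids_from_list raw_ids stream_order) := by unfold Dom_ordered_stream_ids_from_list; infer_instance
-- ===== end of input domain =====

-- B replaces A's two seen-set accumulating loops by one stable sort of the deduplicated raw list
-- under a numeric rank (stream ids get their first stream index, the rest a past-the-end rank in
-- raw order); objective: alternative (sort-based, not faster).

-- ===== PORT A =====
def ordered_stream_ids_from_list (raw_ids : List String) (stream_order : Option (List String)) : List String :=
  let raw := raw_ids
  match stream_order with
  | none => raw
  | some so =>
    if so = [] then raw
    else
      let st1 := so.foldl (fun (st : PySem.Set String × List String) sid =>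
          if raw.contains sid && !(PySem.Set.contains st.1 sid)
          then (PySem.Set.add st.1 sid, st.2 ++ [sid]) else st)
        (PySem.Set.empty, [])
      let st2 := raw.foldl (fun (st : PySem.Set String × List String) sid =>
          if !(PySem.Set.contains st.1 sid)
          then (PySem.Set.add st.1 sid, st.2 ++ [sid]) else st) st1
      st2.2

-- ===== PORT B =====
-- Python's nested 'def rank(sid)' (closure over stream_order, unique, n = len(stream_order)).
-- '.index' is ported with PySem.List.index?; the '.getD 0' can never fire: each branch only
-- calls index on a list the guard (or dedup-membership) proved the element is in.
def pvRankB (so unique : List String) (sid : String) : Int :=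
  if so.contains sid then (((PySem.List.index? so sid).getD 0 : Nat) : Int)
  else (so.length : Int) + (((PySem.List.index? unique sid).getD 0 : Nat) : Int)

def ordered_stream_ids_from_list_alt (raw_ids : List String) (stream_order : Option (List String)) : List String :=
  match stream_order with
  | none => raw_ids
  | some so =>
    if so = [] then raw_ids
    else
      let unique := PySem.List.dedup raw_ids
      PySem.List.sorted unique (pvRankB so unique) false

-- ===== PRECONDITION & SPEC =====
def Spec_ordered_stream_ids_from_list (raw_ids : List String) (stream_order : Option (List String)) (out : List String) : Prop := out = ordered_stream_ids_from_list_alt raw_ids stream_order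
instance (raw_ids : List String) (stream_order : Option (List String)) (out : List String) : Decidable (Spec_ordered_stream_ids_from_list raw_ids stream_order out) := by unfold Spec_ordered_stream_ids_from_list; infer_instance

-- ===== CLAIM (what is proved, stated in full; the proofs are below) =====
def Claim_equal_ordered_stream_ids_from_list : Prop := ∀ (raw_ids : List String) (stream_order : Option (List String)), Dom_ordered_stream_ids_from_list raw_ids stream_order → Spec_ordered_stream_ids_from_list raw_ids stream_order (ordered_stream_ids_from_list raw_ids stream_order)

-- ===== LEMMAS AND PROOFS =====

-- A's pair state (seen, out) keeps seen = out when both start equal and the loop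
-- only appends ids that its condition certifies as not yet seen
theorem pvPairFold (c : List String → String → Bool)
    (hc : ∀ o sid, c o sid = true → sid ∉ o) (xs : List String) :
    ∀ (s : List String),
      xs.foldl (fun (st : PySem.Set String × List String) sid =>
          if c st.1 sid then (PySem.Set.add st.1 sid, st.2 ++ [sid]) else st) (s, s)
      = (xs.foldl (fun o sid => if c o sid then o ++ [sid] else o) s,
         xs.foldl (fun o sid => if c o sid then o ++ [sid] else o) s) := by
  induction xs with
  | nil => intro s; rfl
  | cons x xs ih =>
    intro s
    simp only [List.foldl_cons]
    by_cases h : c s x = true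
    · rw [if_pos h, if_pos h, PySem.Set.add_of_not_mem (hc s x h)]
      exact ih (s ++ [x])
    · rw [if_neg h, if_neg h]
      exact ih s

-- the first loop, collapsed to its out component, is dedup of the raw-filtered stream order
theorem pvLoop1 (raw so : List String) :
    so.foldl (fun o sid => if raw.contains sid && !(PySem.Set.contains o sid) then o ++ [sid] else o)
      (([] : List String) : PySem.Set String)
    = PySem.List.dedup (so.filter (fun sid => raw.contains sid)) := by
  rw [PySem.List.foldl_congr_mem so _
      (fun o sid => if raw.contains sid then PySem.Set.add o sid else o) _
      (by
        intro acc sid _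
        by_cases h2 : sid ∈ acc
        · simp [h2]
        · simp [h2])]
  rw [PySem.List.foldl_if_eq_foldl_filter]
  rw [PySem.List.dedup_eq_ofList, PySem.Set.ofList_eq_foldl]

-- the second loop, collapsed, is set-update of the accumulator with raw
theorem pvLoop2 (xs : List String) (s : PySem.Set String) :
    xs.foldl (fun o sid => if !(PySem.Set.contains o sid) then o ++ [sid] else o) s
    = PySem.Set.update s xs := by
  rw [PySem.List.foldl_congr_mem xs _ (fun o sid => PySem.Set.add o sid) s
      (by
        intro acc sid _
        by_cases h2 : sid ∈ acc
        · simp [h2]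
        · simp [h2])]
  rfl

-- A, in closed form: the deduped raw-restricted stream order, then raw's leftovers in raw order
theorem pvA_eq (raw so : List String) (hso : so ≠ []) :
    ordered_stream_ids_from_list raw (some so)
    = PySem.List.dedup (so.filter (fun sid => raw.contains sid))
      ++ (PySem.List.dedup raw).filter (fun a => !(so.contains a)) := by
  unfold ordered_stream_ids_from_list
  simp only [hso, if_false]
  have hempty : (PySem.Set.empty : PySem.Set String) = ([] : List String) := rfl
  rw [hempty]
  rw [pvPairFold (fun o sid => raw.contains sid && !(PySem.Set.contains o sid))
        (by
          intro o sid h hm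
          simp at h
          exact h.2 hm) so []]
  rw [pvPairFold (fun o sid => !(PySem.Set.contains o sid))
        (by
          intro o sid h hm
          simp at h
          exact h hm) raw _]
  simp only []
  rw [pvLoop1, pvLoop2, PySem.Set.update_eq_append_filter]
  congr 1
  rw [← PySem.List.dedup_eq_ofList]
  refine List.filter_congr (fun a ha => ?_)
  have haraw : a ∈ raw := (PySem.List.mem_dedup _ _).mp ha
  congr 1
  rw [Bool.eq_iff_iff]
  simp only [PySem.Set.contains_iff, PySem.List.mem_dedup, List.mem_filter,
    List.contains_eq_mem, decide_eq_true_eq]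
  tauto

-- list.index, on a member, is the first-occurrence index
theorem pvIndexGetD (l : List String) (a : String) (h : a ∈ l) :
    (PySem.List.index? l a).getD 0 = l.idxOf a := by
  induction l with
  | nil => cases h
  | cons x xs ih =>
    by_cases hx : x = a
    · subst hx
      rw [PySem.List.index?_cons_self]
      simp
    · rw [PySem.List.index?_cons_of_ne xs hx]
      have hm : a ∈ xs := by
        cases h with
        | head => exact absurd rfl hx
        | tail _ h' => exact h'
      obtain ⟨k, hk⟩ := Option.isSome_iff_exists.mp ((PySem.List.index?_isSome_iff xs a).mpr hm)
      rw [List.idxOf_cons_ne xs hx, hk]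
      have h2 := ih hm
      rw [hk] at h2
      simp only [Option.map_some, Option.getD_some] at h2 ⊢
      omega

theorem pvRankB_of_mem (so u : List String) (a : String) (h : a ∈ so) :
    pvRankB so u a = (so.idxOf a : Int) := by
  unfold pvRankB
  rw [if_pos (by simpa using h), pvIndexGetD so a h]

theorem pvRankB_of_not_mem (so u : List String) (a : String) (h : a ∉ so) (hu : a ∈ u) :
    pvRankB so u a = (so.length : Int) + (u.idxOf a : Int) := by
  unfold pvRankB
  rw [if_neg (by simpa using h), pvIndexGetD u a hu]

-- a duplicate-free list is strictly increasing under its own first-occurrence index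
theorem pvNodupPairwiseIdx (l : List String) (h : l.Nodup) :
    l.Pairwise (fun a b => l.idxOf a < l.idxOf b) := by
  rw [List.pairwise_iff_getElem]
  intro i j hi hj hij
  rw [h.idxOf_getElem, h.idxOf_getElem]
  exact hij

-- dedup, cons form
theorem pvDedupCons (x : String) (xs : List String) :
    PySem.List.dedup (x :: xs) = x :: (PySem.List.dedup xs).filter (fun y => !(y == x)) := by
  rw [PySem.List.dedup_eq_ofList, PySem.Set.ofList_cons, ← PySem.List.dedup_eq_ofList]
  simp [PySem.Set.discard]

-- dedup lists elements in order of first occurrence in the source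
theorem pvDedupPairwiseIdx (l : List String) :
    (PySem.List.dedup l).Pairwise (fun a b => l.idxOf a < l.idxOf b) := by
  induction l with
  | nil => simp [PySem.List.dedup]
  | cons x xs ih =>
    rw [pvDedupCons]
    refine List.Pairwise.cons ?_ ?_
    · intro y hy
      have hyx : y ≠ x := by
        have := (List.mem_filter.mp hy).2
        simpa using this
      rw [List.idxOf_cons_self, List.idxOf_cons_ne _ (fun he => hyx he.symm)]
      exact Nat.succ_pos _
    · refine ((ih.filter _).imp_of_mem ?_)
      intro a b ha hb hab
      have hax : a ≠ x := by simpa using (List.mem_filter.mp ha).2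
      have hbx : b ≠ x := by simpa using (List.mem_filter.mp hb).2
      rw [List.idxOf_cons_ne _ (fun he => hax he.symm),
          List.idxOf_cons_ne _ (fun he => hbx he.symm)]
      omega

-- filtering preserves the order of first occurrences
theorem pvFilterIdxMono (p : String → Bool) (l : List String) (a b : String)
    (ha : a ∈ l.filter p) (hb : b ∈ l.filter p)
    (hlt : (l.filter p).idxOf a < (l.filter p).idxOf b) : l.idxOf a < l.idxOf b := by
  induction l with
  | nil => simp at ha
  | cons x xs ih =>
    by_cases hp : p x = true
    · rw [List.filter_cons_of_pos hp] at ha hb hlt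
      by_cases hax : a = x
      · subst hax
        have hba : b ≠ a := by
          intro he; subst he; omega
        rw [List.idxOf_cons_self, List.idxOf_cons_ne _ (fun he => hba he.symm)]
        exact Nat.succ_pos _
      · by_cases hbx : b = x
        · subst hbx
          rw [List.idxOf_cons_self] at hlt
          omega
        · have ha' : a ∈ xs.filter p := by
            cases ha with
            | head => exact absurd rfl hax
            | tail _ h' => exact h'
          have hb' : b ∈ xs.filter p := by
            cases hb with
            | head => exact absurd rfl hbx
            | tail _ h' => exact h'
          rw [List.idxOf_cons_ne _ (fun he => hax he.symm),
              List.idxOf_cons_ne _ (fun he => hbx he.symm)] at hlt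
          rw [List.idxOf_cons_ne _ (fun he => hax he.symm),
              List.idxOf_cons_ne _ (fun he => hbx he.symm)]
          have := ih ha' hb' (by omega)
          omega
    · rw [List.filter_cons_of_neg hp] at ha hb hlt
      have hax : a ≠ x := by
        intro he; subst he
        exact hp (List.mem_filter.mp ha).2
      have hbx : b ≠ x := by
        intro he; subst he
        exact hp (List.mem_filter.mp hb).2
      rw [List.idxOf_cons_ne _ (fun he => hax he.symm),
          List.idxOf_cons_ne _ (fun he => hbx he.symm)]
      have := ih ha hb hlt
      omega

-- B's sort reproduces A's closed form: it is a strictly rank-increasing rearrangement of unique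
theorem pvB_sort (raw so : List String) :
    PySem.List.sorted (PySem.List.dedup raw) (pvRankB so (PySem.List.dedup raw)) false
    = PySem.List.dedup (so.filter (fun sid => raw.contains sid))
      ++ (PySem.List.dedup raw).filter (fun a => !(so.contains a)) := by
  set unique := PySem.List.dedup raw with hu
  set head := PySem.List.dedup (so.filter (fun sid => raw.contains sid)) with hh
  set tail := unique.filter (fun a => !(so.contains a)) with ht
  have hnu : unique.Nodup := PySem.List.nodup_dedup raw
  -- head is a permutation of unique's stream-members
  have hperm_head : head.Perm (unique.filter (fun a => so.contains a)) := by
    refine (List.perm_ext_iff_of_nodup (PySem.List.nodup_dedup _) (hnu.filter _)).mpr ?_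
    intro a
    simp only [hu, PySem.List.mem_dedup, List.mem_filter, List.contains_eq_mem,
      decide_eq_true_eq]
    tauto
  have hperm : (head ++ tail).Perm unique := by
    refine ((hperm_head.append_right tail).trans ?_)
    exact List.filter_append_perm (fun a => so.contains a) unique
  -- head ++ tail is strictly increasing under pvRankB
  have hpw : (head ++ tail).Pairwise (fun a b => pvRankB so unique a < pvRankB so unique b) := by
    rw [List.pairwise_append]
    refine ⟨?_, ?_, ?_⟩
    · -- within head: stream first-occurrence order
      refine ((pvDedupPairwiseIdx _).imp_of_mem ?_)
      intro a b ha hb hab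
      have ha' := (PySem.List.mem_dedup _ _).mp ha
      have hb' := (PySem.List.mem_dedup _ _).mp hb
      have haso : a ∈ so := (List.mem_filter.mp ha').1
      have hbso : b ∈ so := (List.mem_filter.mp hb').1
      rw [pvRankB_of_mem so unique a haso, pvRankB_of_mem so unique b hbso]
      have := pvFilterIdxMono _ so a b ha' hb' hab
      omega
    · -- within tail: raw first-occurrence order (stability)
      have := (pvNodupPairwiseIdx unique hnu).sublist (List.filter_sublist (p := fun a => !(so.contains a)))
      refine (this.imp_of_mem ?_)
      intro a b ha hb hab
      have haso : a ∉ so := by simpa using (List.mem_filter.mp ha).2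
      have hbso : b ∉ so := by simpa using (List.mem_filter.mp hb).2
      rw [pvRankB_of_not_mem so unique a haso (List.mem_filter.mp ha).1, pvRankB_of_not_mem so unique b hbso (List.mem_filter.mp hb).1]
      omega
    · -- across: stream ranks are below the past-the-end ranks
      intro a ha b hb
      have haso : a ∈ so := (List.mem_filter.mp ((PySem.List.mem_dedup _ _).mp ha)).1
      have hbso : b ∉ so := by simpa using (List.mem_filter.mp hb).2
      rw [pvRankB_of_mem so unique a haso, pvRankB_of_not_mem so unique b hbso (List.mem_filter.mp hb).1]
      have := List.idxOf_lt_length_of_mem haso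
      omega
  exact PySem.List.sorted_eq_of_perm_of_pairwise_lt unique (head ++ tail) _ hperm hpw

-- ===== VERDICT (by name: the statement is the Claim_ definition above) =====
theorem ordered_stream_ids_from_list_spec : Claim_equal_ordered_stream_ids_from_list := by
  intro raw_ids stream_order _
  unfold Spec_ordered_stream_ids_from_list
  cases stream_order with
  | none => rfl
  | some so =>
    by_cases hso : so = []
    · subst hso
      simp [ordered_stream_ids_from_list, ordered_stream_ids_from_list_alt]
    · rw [pvA_eq raw_ids so hso]
      unfold ordered_stream_ids_from_list_alt
      simp only [hso, if_false]
      exact (pvB_sort raw_ids so).symm
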